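-- pv_equiv track=rewrite | github.com/Ibtihel-ouni/HackerRank_Submissions- | Problem Solving/Happy Ladybugs.py | happyLadybugs
-- ===== SOURCE A (Python) =====
-- from collections import Counter
-- from itertools import groupby
--
-- def happyLadybugs(b):
--
--     c = Counter(b)
--     if "_" in c:
--         for x,y in c.items():
--             if y < 2 and x != "_":
--                 return "NO"
--     else:
--         for x,y in groupby(b):
--             if len(list(y)) < 2:
--                 return "NO"
--     return "YES"
-- ===== SOURCE B (Python) =====
-- def happyLadybugs(b):
--     # With blanks the bugs can be rearranged freely, so happiness is decided on
--     # the sorted non-blank bugs; without blanks the arrangement is fixed.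
--     # Either way the single test is: no bug may differ from both its neighbours.
--     s = sorted(c for c in b if c != "_") if "_" in b else list(b)
--     for i, c in enumerate(s):
--         if (i == 0 or s[i - 1] != c) and (i == len(s) - 1 or s[i + 1] != c):
--             return "NO"
--     return "YES"
-- ===== Notes on version B (the rewrite author's own statement) =====
-- stated objective: alternative
-- what changed: Replaces A's two separate judgments (Counter count check vs groupby run lengths) by one sort-then-scan algorithm: when blanks are present the non-blank bugs are sorted (equal colours become adjacent), otherwise the string is kept as-is, and a single neighbour scan rejects any bug that differs from both neighbours.
import Mathlib
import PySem

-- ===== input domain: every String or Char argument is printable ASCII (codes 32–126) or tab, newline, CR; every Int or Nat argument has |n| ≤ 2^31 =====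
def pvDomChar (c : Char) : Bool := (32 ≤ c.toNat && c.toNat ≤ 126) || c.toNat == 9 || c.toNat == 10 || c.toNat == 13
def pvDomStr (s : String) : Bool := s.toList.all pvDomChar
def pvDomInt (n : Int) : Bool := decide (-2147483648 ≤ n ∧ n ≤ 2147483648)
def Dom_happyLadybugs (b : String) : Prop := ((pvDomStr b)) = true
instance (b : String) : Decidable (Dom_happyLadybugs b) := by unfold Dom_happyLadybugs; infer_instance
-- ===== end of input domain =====

-- B replaces A's two separate judgments (Counter counts vs groupby run lengths) by one
-- sort-then-scan: sort the non-blank bugs when blanks occur, then a single neighbour scan.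

-- ===== PORT A =====
-- the 'for x,y in c.items(): if y < 2 and x != "_": return "NO"' loop
def pvLoopA : List (Char × Int) → String
  | [] => "YES"
  | (x, y) :: t => if y < 2 ∧ x ≠ '_' then "NO" else pvLoopA t

-- itertools.groupby: run-length groups of consecutive equal chars (current char, count so far)
def pvRunsGo (x : Char) (n : Nat) : List Char → List (Char × Nat)
  | [] => [(x, n)]
  | c :: t => if c = x then pvRunsGo x (n + 1) t else (x, n) :: pvRunsGo c 1 t

def pvRuns : List Char → List (Char × Nat)
  | [] => []
  | c :: t => pvRunsGo c 1 t

-- the 'for x,y in groupby(b): if len(list(y)) < 2: return "NO"' loop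
def pvLoopG : List (Char × Nat) → String
  | [] => "YES"
  | (_, n) :: t => if n < 2 then "NO" else pvLoopG t

def happyLadybugs (b : String) : String :=
  if (PySem.Dict.counter b.toList).contains '_' then pvLoopA (PySem.Dict.counter b.toList).items
  else pvLoopG (pvRuns b.toList)

-- ===== PORT B =====
-- the 'for i, c in enumerate(s)' scan with a prev accumulator: prev = none ⟺ i == 0,
-- and s[i+1] (when i+1 < len(s)) is the head of the remaining tail — exact
def pvLoopB (prev : Option Char) : List Char → String
  | [] => "YES"
  | c :: t => if prev ≠ some c ∧ t.head? ≠ some c then "NO" else pvLoopB (some c) t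

def happyLadybugs_alt (b : String) : String :=
  pvLoopB none
    (if b.toList.contains '_'
     then PySem.List.sorted (b.toList.filter (fun c => c ≠ '_')) (fun c => c) false
     else b.toList)

-- ===== PRECONDITION & SPEC =====
def Spec_happyLadybugs (b : String) (out : String) : Prop := out = happyLadybugs_alt b
instance (b : String) (out : String) : Decidable (Spec_happyLadybugs b out) := by unfold Spec_happyLadybugs; infer_instance

-- ===== CLAIM (what is proved, stated in full; the proofs are below) =====
def Claim_equal_happyLadybugs : Prop := ∀ (b : String), Dom_happyLadybugs b → Spec_happyLadybugs b (happyLadybugs b)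

-- ===== LEMMAS AND PROOFS =====

lemma pvLoopA_eq_all (xs : List (Char × Int)) :
    pvLoopA xs = if xs.all (fun p => !(decide (p.2 < 2) && decide (p.1 ≠ '_'))) then "YES" else "NO" := by
  induction xs with
  | nil => simp [pvLoopA]
  | cons p t ih =>
    obtain ⟨x, y⟩ := p
    rw [pvLoopA, List.all_cons, ih]
    by_cases h : y < 2 ∧ x ≠ '_'
    · rw [if_pos h]
      have hb : (!(decide (y < 2) && decide (x ≠ '_'))) = false := by simp [h.1, h.2]
      rw [hb, Bool.false_and, if_neg (by simp)]
    · rw [if_neg h]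
      have hb : (!(decide (y < 2) && decide (x ≠ '_'))) = true := by
        simp only [Bool.not_and, Bool.or_eq_true, Bool.not_eq_true', decide_eq_false_iff_not,
          not_not]
        tauto
      rw [hb, Bool.true_and]

-- B's neighbour scan computes exactly A's groupby judgment, on ANY list
lemma run_case (t : List Char) : ∀ (x : Char) (n : Nat), 1 ≤ n →
    pvLoopG (pvRunsGo x n t) =
      if 2 ≤ n ∨ t.head? = some x then pvLoopB (some x) t else "NO" := by
  induction t with
  | nil =>
    intro x n hn
    by_cases h2 : 2 ≤ n
    · simp [pvRunsGo, pvLoopG, pvLoopB, h2, Nat.not_lt.mpr h2]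
    · simp [pvRunsGo, pvLoopG, h2]
      omega
  | cons c t ih =>
    intro x n hn
    by_cases hcx : c = x
    · subst hcx
      rw [pvRunsGo, if_pos rfl, ih c (n + 1) (by omega)]
      simp [pvLoopB, show (2:ℕ) ≤ n + 1 from by omega]
    · rw [pvRunsGo, if_neg hcx, pvLoopG]
      by_cases h2 : 2 ≤ n
      · rw [if_neg (by omega), if_pos (Or.inl h2), ih c 1 le_rfl, pvLoopB]
        by_cases hh : t.head? = some c
        · rw [if_pos (Or.inr hh), if_neg (by simp [hh])]
        · rw [if_neg (by simp [hh]), if_pos ⟨by simpa using fun h => hcx h.symm, by simp [hh]⟩]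
      · rw [if_pos (by omega), if_neg (by simp [hcx]; omega)]

lemma loopG_runs_eq_loopB (l : List Char) : pvLoopG (pvRuns l) = pvLoopB none l := by
  cases l with
  | nil => simp [pvRuns, pvLoopG, pvLoopB]
  | cons c t =>
    rw [pvRuns, run_case t c 1 le_rfl, pvLoopB]
    by_cases hh : t.head? = some c
    · rw [if_pos (Or.inr hh), if_neg (by simp [hh])]
    · rw [if_neg (by simp [hh]), if_pos ⟨by simp, by simp [hh]⟩]

lemma pvCountConsNe {d c : Char} (t : List Char) (h : d ≠ c) :
    (c :: t).count d = t.count d := by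
  simp [Ne.symm h]

-- on a sorted list, the groupby judgment is the count-≥-2 judgment
lemma runsGo_sorted (t : List Char) : ∀ (x : Char) (n : Nat), (x :: t).Pairwise (· ≤ ·) →
    pvLoopG (pvRunsGo x n t) =
      if 2 ≤ n + t.count x ∧ ∀ c ∈ t, c ≠ x → 2 ≤ t.count c then "YES" else "NO" := by
  induction t with
  | nil => intro x n _; by_cases h2 : 2 ≤ n <;> simp [pvRunsGo, pvLoopG, h2] <;> omega
  | cons c t ih =>
    intro x n hp
    by_cases hcx : c = x
    · subst hcx
      rw [pvRunsGo, if_pos rfl, ih c (n + 1) hp.tail]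
      congr 1
      rw [eq_iff_iff]
      constructor
      · rintro ⟨h1, h2⟩
        refine ⟨by rw [List.count_cons_self]; omega, ?_⟩
        intro d hd hdc
        rcases List.mem_cons.1 hd with hd | hd
        · exact absurd hd hdc
        · rw [pvCountConsNe t hdc]; exact h2 d hd hdc
      · rintro ⟨h1, h2⟩
        rw [List.count_cons_self] at h1
        refine ⟨by omega, ?_⟩
        intro d hd hdc
        have := h2 d (List.mem_cons_of_mem _ hd) hdc
        rwa [pvCountConsNe t hdc] at this
    · -- c ≠ x, so x < c and x never occurs again in c :: t
      have hxc : x < c := lt_of_le_of_ne (List.rel_of_pairwise_cons hp (List.mem_cons_self)) (fun h => hcx h.symm)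
      have hxt : ∀ d ∈ t, x < d := fun d hd =>
        lt_of_lt_of_le hxc (List.rel_of_pairwise_cons hp.tail hd)
      have hcount : (c :: t).count x = 0 := by
        rw [List.count_eq_zero]
        intro hmem
        rcases List.mem_cons.1 hmem with h | h
        · exact hcx h.symm
        · exact absurd rfl (ne_of_gt (hxt x h))
      rw [pvRunsGo, if_neg hcx, pvLoopG]
      by_cases h2 : 2 ≤ n
      · rw [if_neg (by omega), ih c 1 hp.tail]
        congr 1
        rw [eq_iff_iff]
        constructor
        · rintro ⟨h1, hrest⟩
          refine ⟨by rw [hcount]; omega, ?_⟩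
          intro d hd hdx
          rcases List.mem_cons.1 hd with hd | hd
          · subst hd; rw [List.count_cons_self]; omega
          · by_cases hdc : d = c
            · subst hdc; rw [List.count_cons_self]; omega
            · rw [pvCountConsNe t hdc]; exact hrest d hd hdc
        · rintro ⟨_, hrest⟩
          have hc2 : 2 ≤ (c :: t).count c := hrest c List.mem_cons_self (fun hh => hcx hh)
          rw [List.count_cons_self] at hc2
          refine ⟨by omega, ?_⟩
          intro d hd hdc
          have hdx : d ≠ x := ne_of_gt (hxt d hd)
          have := hrest d (List.mem_cons_of_mem _ hd) hdx
          rwa [pvCountConsNe t hdc] at this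
      · rw [if_pos (by omega), if_neg (by rw [hcount]; omega)]

-- ===== VERDICT (by name: the statement is the Claim_ definition above) =====
theorem happyLadybugs_spec : Claim_equal_happyLadybugs := by
  intro b _
  unfold Spec_happyLadybugs happyLadybugs happyLadybugs_alt
  rw [PySem.Dict.contains_counter]
  by_cases hm : b.toList.contains '_'
  · rw [if_pos hm, if_pos hm, pvLoopA_eq_all]
    set s := b.toList with hs
    set m := PySem.List.sorted (s.filter (fun c => c ≠ '_')) (fun c => c) false with hmdef
    have hperm : m.Perm (s.filter (fun c => c ≠ '_')) := PySem.List.sorted_perm _ _ _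
    have hcnt : ∀ c, m.count c = (s.filter (fun c => c ≠ '_')).count c := fun c => hperm.count_eq c
    have hmem : ∀ c, c ∈ m ↔ c ∈ s ∧ c ≠ '_' := by
      intro c
      rw [hperm.mem_iff, List.mem_filter]
      simp
    -- the shared count condition
    have hcf : ∀ c, c ≠ '_' → (s.filter (fun c => c ≠ '_')).count c = s.count c := by
      intro c hc
      rw [List.count_filter (by simp [hc])]
    have key : (∀ c ∈ m, 2 ≤ m.count c) ↔ (∀ x ∈ s, x ≠ '_' → 2 ≤ s.count x) := by
      constructor
      · intro h x hx hxne
        have := h x ((hmem x).2 ⟨hx, hxne⟩)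
        rwa [hcnt, hcf x hxne] at this
      · intro h c hc
        obtain ⟨hcs, hcne⟩ := (hmem c).1 hc
        rw [hcnt, hcf c hcne]
        exact h c hcs hcne
    have hA : (((PySem.Dict.counter s).items).all
        (fun p => !(decide (p.2 < 2) && decide (p.1 ≠ '_')))) = true ↔
        (∀ x ∈ s, x ≠ '_' → 2 ≤ s.count x) := by
      rw [PySem.Dict.items_counter, List.all_map, List.all_eq_true]
      constructor
      · intro h x hx hxne
        have := h x (by rw [PySem.Set.mem_ofList]; exact hx)
        simp only [Function.comp, Bool.not_and, Bool.or_eq_true, Bool.not_eq_true',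
          decide_eq_false_iff_not, not_lt, not_not] at this
        rcases this with h1 | h1
        · exact_mod_cast h1
        · exact absurd h1 hxne
      · intro h x hx
        rw [PySem.Set.mem_ofList] at hx
        simp only [Function.comp, Bool.not_and, Bool.or_eq_true, Bool.not_eq_true',
          decide_eq_false_iff_not, not_lt, not_not]
        by_cases hxne : x = '_'
        · exact Or.inr hxne
        · exact Or.inl (by exact_mod_cast h x hx hxne)
    have hB : pvLoopB none m = if (∀ c ∈ m, 2 ≤ m.count c) then "YES" else "NO" := by
      rw [← loopG_runs_eq_loopB]
      cases hmx : m with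
      | nil => simp [pvRuns, pvLoopG]
      | cons c t =>
        have hpw : (c :: t).Pairwise (· ≤ ·) := by
          rw [← hmx, hmdef]; exact PySem.List.sorted_pairwise _ _
        rw [pvRuns, runsGo_sorted t c 1 hpw]
        congr 1
        rw [eq_iff_iff]
        constructor
        · rintro ⟨h1, h2⟩ d hd
          rcases List.mem_cons.1 hd with hd | hd
          · subst hd; rw [List.count_cons_self]; omega
          · by_cases hdc : d = c
            · subst hdc; rw [List.count_cons_self]; omega
            · rw [pvCountConsNe t hdc]; exact h2 d hd hdc
        · intro h
          have hc2 := h c List.mem_cons_self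
          rw [List.count_cons_self] at hc2
          refine ⟨by omega, ?_⟩
          intro d hd hdc
          have := h d (List.mem_cons_of_mem _ hd)
          rwa [pvCountConsNe t hdc] at this
    rw [hB]
    by_cases hcond : ∀ x ∈ s, x ≠ '_' → 2 ≤ s.count x
    · rw [if_pos (hA.2 hcond), if_pos (key.2 hcond)]
    · rw [if_neg (fun h => hcond (hA.1 h)), if_neg (fun h => hcond (key.1 h))]
  · rw [if_neg hm, if_neg hm, loopG_runs_eq_loopB]
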